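-- pv_equiv track=rewrite | github.com/yy987y/wecom_auto_end | wecom_ocr.py | parse_messages_from_ocr
-- ===== SOURCE A (Python) =====
-- def parse_messages_from_ocr(lines):
--     """从 OCR 结果解析消息"""
--     messages = []
--     current_sender = None
--     current_content = []
--
--     for line in lines:
--         line = line.strip()
--         if not line:
--             continue
--
--         # 简单启发式：如果行尾有 @ 或包含时间，可能是发送者
--         # 这里需要根据实际 OCR 结果调整
--         if '@' in line or ':' in line[:10]:
--             # 保存上一条消息
--             if current_sender and current_content:
--                 messages.append({
--                     'sender': current_sender,
--                     'content': ' '.join(current_content),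
--                     'body': f'{current_sender}: {" ".join(current_content)}'
--                 })
--
--             # 开始新消息
--             current_sender = line
--             current_content = []
--         else:
--             # 消息内容
--             current_content.append(line)
--
--     # 保存最后一条
--     if current_sender and current_content:
--         messages.append({
--             'sender': current_sender,
--             'content': ' '.join(current_content),
--             'body': f'{current_sender}: {" ".join(current_content)}'
--         })
--
--     return messages
-- ===== SOURCE B (Python) =====
-- def _is_sender(line):
--     return '@' in line or ':' in line[:10]
--
--
-- def parse_messages_from_ocr(lines):
--     """从 OCR 结果解析消息"""
--     cleaned = [s for s in map(str.strip, lines) if s]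
--     out = []
--     pending = []  # content lines belonging to the sender we have not yet seen (scanning backwards)
--     for line in reversed(cleaned):
--         if _is_sender(line):
--             if pending:
--                 content = ' '.join(pending[::-1])
--                 out.append({
--                     'sender': line,
--                     'content': content,
--                     'body': f'{line}: {content}'
--                 })
--             pending = []
--         else:
--             pending.append(line)
--     out.reverse()
--     return out
-- ===== Notes on version B (the rewrite author's own statement) =====
-- stated objective: alternative
-- what changed: Replaces A's single accumulate-and-flush loop (Option sender state and a duplicated emit block repeated after the loop) with a clean-and-filter pass followed by one backwards scan that collects each message's pending content and emits it exactly once, reversing order at the end.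
import Mathlib
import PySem

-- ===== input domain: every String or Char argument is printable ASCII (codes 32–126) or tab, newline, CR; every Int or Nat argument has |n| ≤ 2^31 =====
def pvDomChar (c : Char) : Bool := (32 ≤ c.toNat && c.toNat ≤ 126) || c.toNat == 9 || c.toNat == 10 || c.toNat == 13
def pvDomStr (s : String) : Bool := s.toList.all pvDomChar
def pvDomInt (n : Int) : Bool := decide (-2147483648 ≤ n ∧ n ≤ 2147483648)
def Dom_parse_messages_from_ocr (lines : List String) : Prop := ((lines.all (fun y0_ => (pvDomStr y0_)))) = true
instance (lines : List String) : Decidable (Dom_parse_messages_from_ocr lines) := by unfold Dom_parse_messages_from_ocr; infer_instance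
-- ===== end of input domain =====

-- B rewrites A's accumulate-and-flush loop (with its duplicated emit block) as a clean-filter
-- pass followed by a single backwards scan that emits each message once; objective: alternative.

-- shared formatting/classification helpers (identical text in both Pythons)
def pvIsSender (l : String) : Bool :=
  PySem.Str.isIn "@" l || PySem.Str.isIn ":" (PySem.Str.slice l none (some 10))

def pvMsg (s : String) (c : List String) : List (String × String) :=
  [("sender", s),
   ("content", PySem.Str.join " " c),
   ("body", PySem.Str.join "" [s, ": ", PySem.Str.join " " c])]

-- ===== PORT A =====
-- the duplicated 'save the previous message' block of A
def pvFlush (msgs : List (List (String × String))) (cs : Option String)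
    (cc : List String) : List (List (String × String)) :=
  match cs with
  | none => msgs
  | some s => if s ≠ "" ∧ cc ≠ [] then msgs ++ [pvMsg s cc] else msgs

def pvStepA (st : List (List (String × String)) × Option String × List String)
    (line : String) : List (List (String × String)) × Option String × List String :=
  let l := PySem.Str.strip line
  if l = "" then st
  else if pvIsSender l then (pvFlush st.1 st.2.1 st.2.2, some l, [])
  else (st.1, st.2.1, st.2.2 ++ [l])

def parse_messages_from_ocr (lines : List String) : List (List (String × String)) :=
  let st := lines.foldl pvStepA ([], none, [])
  pvFlush st.1 st.2.1 st.2.2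

-- ===== PORT B =====
def pvStepB (acc : List (List (String × String)) × List String)
    (line : String) : List (List (String × String)) × List String :=
  if pvIsSender line then
    ((if acc.2 ≠ [] then acc.1 ++ [pvMsg line acc.2.reverse] else acc.1), [])
  else (acc.1, acc.2 ++ [line])

def parse_messages_from_ocr_alt (lines : List String) : List (List (String × String)) :=
  let cleaned := (lines.map PySem.Str.strip).filter (fun s => s ≠ "")
  let st := cleaned.reverse.foldl pvStepB ([], [])
  st.1.reverse

-- ===== PRECONDITION & SPEC =====
def Spec_parse_messages_from_ocr (lines : List String) (out : List (List (String × String))) : Prop := out = parse_messages_from_ocr_alt lines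
instance (lines : List String) (out : List (List (String × String))) : Decidable (Spec_parse_messages_from_ocr lines out) := by unfold Spec_parse_messages_from_ocr; infer_instance

-- ===== CLAIM (what is proved, stated in full; the proofs are below) =====
def Claim_equal_parse_messages_from_ocr : Prop := ∀ (lines : List String), Dom_parse_messages_from_ocr lines → Spec_parse_messages_from_ocr lines (parse_messages_from_ocr lines)

-- ===== LEMMAS AND PROOFS =====

-- A's step restricted to an already-stripped, nonempty line
def pvStepA' (st : List (List (String × String)) × Option String × List String)
    (l : String) : List (List (String × String)) × Option String × List String :=
  if pvIsSender l then (pvFlush st.1 st.2.1 st.2.2, some l, [])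
  else (st.1, st.2.1, st.2.2 ++ [l])

-- B's backwards scan as a structural recursion from the front
def pvRunB : List String → List (List (String × String)) × List String
  | [] => ([], [])
  | l :: ls =>
    let r := pvRunB ls
    if pvIsSender l then ((if r.2 ≠ [] then pvMsg l r.2 :: r.1 else r.1), []) else (r.1, l :: r.2)

-- the pending flush, given the stored sender is known nonempty
def pvFlush2 (cs : Option String) (c : List String) : List (List (String × String)) :=
  match cs with
  | none => []
  | some s => if c ≠ [] then [pvMsg s c] else []

theorem pvFoldA_clean (lines : List String) (st : List (List (String × String)) × Option String × List String) :
    lines.foldl pvStepA st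
      = ((lines.map PySem.Str.strip).filter (fun s => s ≠ "")).foldl pvStepA' st := by
  induction lines generalizing st with
  | nil => rfl
  | cons line rest ih =>
    simp only [List.map_cons, List.filter_cons]
    by_cases h : PySem.Str.strip line = ""
    · simp [List.foldl_cons, pvStepA, h, ih]
    · simp [List.foldl_cons, pvStepA, pvStepA', h, ih]

theorem pvFoldB_runB (ls : List String) :
    ls.reverse.foldl pvStepB ([], [])
      = ((pvRunB ls).1.reverse, (pvRunB ls).2.reverse) := by
  induction ls with
  | nil => rfl
  | cons l rest ih =>
    simp only [List.reverse_cons, List.foldl_append, ih, List.foldl_cons, List.foldl_nil]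
    simp only [pvRunB, pvStepB]
    by_cases h : pvIsSender l
    · by_cases hp : (pvRunB rest).2 = [] <;> simp [h, hp]
    · simp [h]

theorem pvFoldA'_runB (ls : List String) (hne : ∀ x ∈ ls, x ≠ "")
    (msgs : List (List (String × String))) (cs : Option String) (cc : List String)
    (hcs : ∀ s, cs = some s → s ≠ "") :
    pvFlush (ls.foldl pvStepA' (msgs, cs, cc)).1 (ls.foldl pvStepA' (msgs, cs, cc)).2.1
        (ls.foldl pvStepA' (msgs, cs, cc)).2.2
      = msgs ++ pvFlush2 cs (cc ++ (pvRunB ls).2) ++ (pvRunB ls).1 := by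
  induction ls generalizing msgs cs cc with
  | nil =>
    simp only [List.foldl_nil, pvRunB, List.append_nil]
    cases cs with
    | none => simp [pvFlush, pvFlush2]
    | some s =>
      have hs : s ≠ "" := hcs s rfl
      by_cases hc : cc = [] <;> simp [pvFlush, pvFlush2, hs, hc]
  | cons l rest ih =>
    have hl : l ≠ "" := hne l (by simp)
    have hne' : ∀ x ∈ rest, x ≠ "" := fun x hx => hne x (by simp [hx])
    simp only [List.foldl_cons, pvStepA', pvRunB]
    by_cases h : pvIsSender l
    · simp only [h, if_pos]
      rw [ih hne' (pvFlush msgs cs cc) (some l) [] (fun s hs => Option.some.inj hs ▸ hl)]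
      have hfl : pvFlush msgs cs cc = msgs ++ pvFlush2 cs cc := by
        cases cs with
        | none => simp [pvFlush, pvFlush2]
        | some s =>
          have hs : s ≠ "" := hcs s rfl
          by_cases hc : cc = [] <;> simp [pvFlush, pvFlush2, hs, hc]
      by_cases hp : (pvRunB rest).2 = [] <;>
        simp [hfl, hp, pvFlush2, List.append_assoc]
    · simp only [h, if_neg, Bool.false_eq_true, not_false_iff]
      rw [ih hne' msgs cs (cc ++ [l]) hcs]
      simp [List.append_assoc]

-- ===== VERDICT (by name: the statement is the Claim_ definition above) =====
theorem parse_messages_from_ocr_spec : Claim_equal_parse_messages_from_ocr := by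
  intro lines _
  show parse_messages_from_ocr lines = parse_messages_from_ocr_alt lines
  simp only [parse_messages_from_ocr, parse_messages_from_ocr_alt]
  rw [pvFoldA_clean, pvFoldB_runB]
  have hne : ∀ x ∈ (lines.map PySem.Str.strip).filter (fun s => s ≠ ""), x ≠ "" := by
    intro x hx
    have := List.of_mem_filter hx
    simpa using this
  have := pvFoldA'_runB ((lines.map PySem.Str.strip).filter (fun s => s ≠ "")) hne
      [] none [] (by intro s hs; cases hs)
  simpa [pvFlush2] using this
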